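-- pv_equiv track=rewrite | github.com/arfc/d3ploy | d3ploy/deployment_inst.py | build_buffer_type_dict
-- ===== SOURCE A (Python) =====
-- def build_buffer_type_dict(buffer, commods):
--     buffer_dict = {}
--     for i in commods:
--         count = 0
--         for key, value in buffer.items():
--             if i == key:
--                 count += 1
--                 buffer_dict[key] = value
--         if count == 0:
--             buffer_dict[i] = "perc"
--     return buffer_dict
-- ===== SOURCE B (Python) =====
-- def build_buffer_type_dict(buffer, commods):
--     buffer_dict = {c: "perc" for c in commods}
--     commod_set = set(commods)
--     for key, value in buffer.items():
--         if key in commod_set: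
--             buffer_dict[key] = value
--     return buffer_dict
-- ===== Notes on version B (the rewrite author's own statement) =====
-- stated objective: faster
-- what changed: Instead of scanning the whole buffer once per commodity with a match counter, B builds the dict of 'perc' defaults for all commods first and then makes a single pass over buffer overwriting entries whose key is in a precomputed set of commods.
import Mathlib
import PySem

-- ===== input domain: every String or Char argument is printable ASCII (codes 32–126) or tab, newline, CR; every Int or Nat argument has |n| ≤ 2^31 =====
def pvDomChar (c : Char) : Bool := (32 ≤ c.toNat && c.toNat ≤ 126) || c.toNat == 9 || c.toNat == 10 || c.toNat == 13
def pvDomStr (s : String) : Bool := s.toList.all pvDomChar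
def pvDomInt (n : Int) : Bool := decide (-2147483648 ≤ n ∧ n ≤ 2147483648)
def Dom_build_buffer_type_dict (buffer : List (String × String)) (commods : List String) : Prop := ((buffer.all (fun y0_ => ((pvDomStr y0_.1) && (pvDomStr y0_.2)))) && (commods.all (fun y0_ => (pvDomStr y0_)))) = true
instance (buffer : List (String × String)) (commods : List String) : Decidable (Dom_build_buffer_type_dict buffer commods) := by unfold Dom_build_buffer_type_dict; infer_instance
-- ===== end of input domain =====

-- B replaces A's per-commodity scan of the buffer by a defaults pass over commods plus one
-- override pass over the buffer with a set membership test (objective: faster).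

-- ===== PORT A =====
def build_buffer_type_dict (buffer : List (String × String)) (commods : List String) : List (String × String) :=
  (commods.foldl (fun (d : PySem.Dict String String) i =>
      let r := buffer.foldl (fun (p : PySem.Dict String String × Int) kv =>
          if i == kv.1 then (p.1.insert kv.1 kv.2, p.2 + 1) else p) (d, (0 : Int))
      if r.2 == 0 then r.1.insert i "perc" else r.1)
    PySem.Dict.empty).items

-- ===== PORT B =====
def build_buffer_type_dict_alt (buffer : List (String × String)) (commods : List String) : List (String × String) :=
  let d0 : PySem.Dict String String := commods.foldl (fun d c => d.insert c "perc") PySem.Dict.empty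
  let commodSet : PySem.Set String := PySem.Set.ofList commods
  (buffer.foldl (fun d kv => if commodSet.contains kv.1 then d.insert kv.1 kv.2 else d) d0).items

-- ===== PRECONDITION & SPEC =====
def Spec_build_buffer_type_dict (buffer : List (String × String)) (commods : List String) (out : List (String × String)) : Prop := out = build_buffer_type_dict_alt buffer commods
instance (buffer : List (String × String)) (commods : List String) (out : List (String × String)) : Decidable (Spec_build_buffer_type_dict buffer commods out) := by unfold Spec_build_buffer_type_dict; infer_instance

-- ===== CLAIM (what is proved, stated in full; the proofs are below) =====
def Claim_equal_build_buffer_type_dict : Prop := ∀ (buffer : List (String × String)) (commods : List String), Dom_build_buffer_type_dict buffer commods → Spec_build_buffer_type_dict buffer commods (build_buffer_type_dict buffer commods)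

-- ===== LEMMAS AND PROOFS =====

-- last value stored for key k while scanning buffer left to right (later entries win)
def pvLastVal (buffer : List (String × String)) (k : String) : Option String :=
  match buffer with
  | [] => none
  | kv :: rest =>
    match pvLastVal rest k with
    | some v => some v
    | none => if kv.1 = k then some kv.2 else none

-- the value each program ends up storing for commodity k
def pvVal (buffer : List (String × String)) (k : String) : String :=
  (pvLastVal buffer k).getD "perc"

-- ---- A side ----

theorem inner_fst (buffer : List (String × String)) (i : String)
    (d : PySem.Dict String String) (c : Int) :
    (buffer.foldl (fun (p : PySem.Dict String String × Int) kv =>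
        if i == kv.1 then (p.1.insert kv.1 kv.2, p.2 + 1) else p) (d, c)).1 =
      match pvLastVal buffer i with
      | some v => d.insert i v
      | none => d := by
  induction buffer generalizing d c with
  | nil => rfl
  | cons kv rest ih =>
    obtain ⟨a, b⟩ := kv
    simp only [List.foldl_cons, pvLastVal]
    by_cases h : i = a
    · subst h
      simp only [beq_self_eq_true, reduceIte]
      rw [ih]
      cases pvLastVal rest i with
      | none => simp
      | some v => simp [PySem.Dict.insert_insert_self]
    · have hb : (i == a) = false := by simp [h]
      simp only [hb, Bool.false_eq_true, reduceIte]
      rw [ih]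
      cases pvLastVal rest i with
      | none =>
        have hne : ¬ a = i := fun hh => h hh.symm
        simp [hne]
      | some v => simp

theorem inner_snd (buffer : List (String × String)) (i : String)
    (d : PySem.Dict String String) (c : Int) :
    (buffer.foldl (fun (p : PySem.Dict String String × Int) kv =>
        if i == kv.1 then (p.1.insert kv.1 kv.2, p.2 + 1) else p) (d, c)).2 =
      c + (buffer.countP (fun kv => i == kv.1) : Int) := by
  induction buffer generalizing d c with
  | nil => simp
  | cons kv rest ih =>
    obtain ⟨a, b⟩ := kv
    simp only [List.foldl_cons, List.countP_cons]
    by_cases h : (i == a) = true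
    · simp only [h, reduceIte, ih]
      push_cast
      ring
    · simp only [h, Bool.false_eq_true, reduceIte, ih]
      simp

theorem lastVal_none_iff (buffer : List (String × String)) (i : String) :
    pvLastVal buffer i = none ↔ buffer.countP (fun kv => i == kv.1) = 0 := by
  induction buffer with
  | nil => simp [pvLastVal]
  | cons kv rest ih =>
    obtain ⟨a, b⟩ := kv
    simp only [pvLastVal, List.countP_cons]
    cases hrest : pvLastVal rest i with
    | some v =>
      have hc : rest.countP (fun kv => i == kv.1) ≠ 0 := by
        intro hz
        rw [ih.2 hz] at hrest
        simp at hrest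
      constructor
      · intro hh; exact absurd hh (by simp)
      · intro hh; exact absurd hh (by split_ifs <;> omega)
    | none =>
      have hz : rest.countP (fun kv => i == kv.1) = 0 := ih.1 hrest
      by_cases h : a = i
      · subst h; simp [hz]
      · have hb : (i == a) = false := by simp [Ne.symm h]
        simp [h, hb, hz]

theorem stepA_eq (buffer : List (String × String)) (i : String)
    (d : PySem.Dict String String) :
    (let r := buffer.foldl (fun (p : PySem.Dict String String × Int) kv =>
          if i == kv.1 then (p.1.insert kv.1 kv.2, p.2 + 1) else p) (d, (0 : Int))
     if r.2 == 0 then r.1.insert i "perc" else r.1) = d.insert i (pvVal buffer i) := by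
  show (if (buffer.foldl (fun (p : PySem.Dict String String × Int) kv =>
          if i == kv.1 then (p.1.insert kv.1 kv.2, p.2 + 1) else p) (d, (0 : Int))).2 == 0
        then (buffer.foldl (fun (p : PySem.Dict String String × Int) kv =>
          if i == kv.1 then (p.1.insert kv.1 kv.2, p.2 + 1) else p) (d, (0 : Int))).1.insert i "perc"
        else (buffer.foldl (fun (p : PySem.Dict String String × Int) kv =>
          if i == kv.1 then (p.1.insert kv.1 kv.2, p.2 + 1) else p) (d, (0 : Int))).1)
      = d.insert i (pvVal buffer i)
  rw [inner_snd, inner_fst]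
  cases hl : pvLastVal buffer i with
  | none =>
    have hc : buffer.countP (fun kv => i == kv.1) = 0 := (lastVal_none_iff buffer i).1 hl
    simp [hc, pvVal, hl]
  | some v =>
    have hc : buffer.countP (fun kv => i == kv.1) ≠ 0 := by
      intro hz
      rw [(lastVal_none_iff buffer i).2 hz] at hl
      simp at hl
    have hb : (((0 : Int) + (buffer.countP (fun kv => i == kv.1) : Int)) == 0) = false := by
      simp only [beq_eq_false_iff_ne, ne_eq]
      omega
    simp only [hb, Bool.false_eq_true, reduceIte]
    simp [pvVal, hl]

-- folding value-function inserts: lookup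
theorem foldl_insert_get? (cs : List String) (val : String → String)
    (d : PySem.Dict String String) (k : String) :
    (cs.foldl (fun d c => d.insert c (val c)) d).get? k =
      if k ∈ cs then some (val k) else d.get? k := by
  induction cs generalizing d with
  | nil => simp
  | cons c rest ih =>
    simp only [List.foldl_cons, ih]
    by_cases h1 : k ∈ rest
    · simp [h1]
    · by_cases h2 : k = c
      · subst h2; simp [h1, PySem.Dict.get?_insert_self]
      · simp [h1, h2, PySem.Dict.get?_insert_of_ne d (val c) h2]

-- A's dict as a whole fold of canonical inserts
theorem A_dict_eq (buffer : List (String × String)) (commods : List String) :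
    build_buffer_type_dict buffer commods =
      (commods.foldl (fun d i => d.insert i (pvVal buffer i)) PySem.Dict.empty).items := by
  unfold build_buffer_type_dict
  congr 1
  exact PySem.List.foldl_congr_mem _ _ _ _ (fun acc x _ => stepA_eq buffer x acc)

-- ---- B side ----

theorem B_keys_and_get? (buffer : List (String × String)) (commods : List String)
    (d : PySem.Dict String String)
    (hk : ∀ k, k ∈ commods → d.contains k = true) :
    (buffer.foldl (fun d kv =>
        if (PySem.Set.ofList commods).contains kv.1 then d.insert kv.1 kv.2 else d) d).keys
      = d.keys ∧
    ∀ k, k ∈ commods →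
      (buffer.foldl (fun d kv =>
          if (PySem.Set.ofList commods).contains kv.1 then d.insert kv.1 kv.2 else d) d).get? k
        = (match pvLastVal buffer k with | some v => some v | none => d.get? k) := by
  induction buffer generalizing d with
  | nil => exact ⟨rfl, fun k _ => rfl⟩
  | cons kv rest ih =>
    obtain ⟨a, b⟩ := kv
    by_cases hmem : a ∈ commods
    · have hcs : (PySem.Set.ofList commods).contains a = true := by
        simp [PySem.Set.mem_ofList, hmem]
      have hkins : ∀ k, k ∈ commods → (d.insert a b).contains k = true := by
        intro k hkc
        rw [PySem.Dict.contains_insert]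
        simp [hk k hkc]
      obtain ⟨ihkeys, ihget⟩ := ih (d.insert a b) hkins
      refine ⟨?_, ?_⟩
      · simp only [List.foldl_cons, hcs, reduceIte]
        rw [ihkeys]
        exact PySem.Dict.keys_insert_of_contains d b (hk a hmem)
      · intro k hkc
        simp only [List.foldl_cons, hcs, reduceIte]
        rw [ihget k hkc]
        simp only [pvLastVal]
        cases hl : pvLastVal rest k with
        | some v => simp
        | none =>
          by_cases he : a = k
          · subst he; simp [PySem.Dict.get?_insert_self]
          · simp only [he, reduceIte]
            simp [PySem.Dict.get?_insert_of_ne d b (fun hh => he hh.symm)]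
    · have hcs : (PySem.Set.ofList commods).contains a = false := by
        simp [PySem.Set.mem_ofList, hmem]
      obtain ⟨ihkeys, ihget⟩ := ih d hk
      refine ⟨?_, ?_⟩
      · simpa only [List.foldl_cons, hcs, Bool.false_eq_true, reduceIte] using ihkeys
      · intro k hkc
        simp only [List.foldl_cons, hcs, Bool.false_eq_true, reduceIte]
        rw [ihget k hkc]
        simp only [pvLastVal]
        cases hl : pvLastVal rest k with
        | some v => simp
        | none =>
          have hne : ¬ a = k := fun hh => hmem (hh ▸ hkc)
          simp [hne]

-- the canonical defaults fold: keys
theorem canon_keys (cs : List String) (val : String → String) :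
    (cs.foldl (fun d c => d.insert c (val c)) PySem.Dict.empty).keys = PySem.Set.ofList cs := by
  have h := PySem.Dict.keys_foldl_insert cs (fun _ c => val c) PySem.Dict.empty
  rw [PySem.Dict.keys_empty, PySem.Set.update_nil_left] at h
  exact h

theorem canon_nodup (cs : List String) (val : String → String) :
    (cs.foldl (fun d c => d.insert c (val c)) PySem.Dict.empty).keys.Nodup := by
  rw [canon_keys]
  exact PySem.Set.nodup_ofList cs

-- ===== VERDICT (by name: the statement is the Claim_ definition above) =====
theorem build_buffer_type_dict_spec : Claim_equal_build_buffer_type_dict := by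
  intro buffer commods _
  show build_buffer_type_dict buffer commods = build_buffer_type_dict_alt buffer commods
  rw [A_dict_eq]
  show _ = (buffer.foldl (fun d kv =>
      if (PySem.Set.ofList commods).contains kv.1 then d.insert kv.1 kv.2 else d)
      (commods.foldl (fun d c => d.insert c "perc") PySem.Dict.empty)).items
  have hget0 : ∀ k, (commods.foldl (fun d c => d.insert c "perc") PySem.Dict.empty).get? k =
      if k ∈ commods then some "perc" else PySem.Dict.empty.get? k :=
    fun k => foldl_insert_get? commods (fun _ => "perc") PySem.Dict.empty k
  have hk0 : ∀ k, k ∈ commods →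
      (commods.foldl (fun d c => d.insert c "perc") PySem.Dict.empty).contains k = true := by
    intro k hkc
    rw [PySem.Dict.contains_eq_isSome_get?, hget0 k]
    simp [hkc]
  obtain ⟨hBkeys, hBget⟩ := B_keys_and_get? buffer commods _ hk0
  have hkeys0 : (commods.foldl (fun d c => d.insert c "perc") PySem.Dict.empty).keys
      = PySem.Set.ofList commods := canon_keys commods (fun _ => "perc")
  have hndA : (commods.foldl (fun d i => d.insert i (pvVal buffer i)) PySem.Dict.empty).keys.Nodup :=
    canon_nodup commods (fun i => pvVal buffer i)
  have hndB : (buffer.foldl (fun d kv =>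
      if (PySem.Set.ofList commods).contains kv.1 then d.insert kv.1 kv.2 else d)
      (commods.foldl (fun d c => d.insert c "perc") PySem.Dict.empty)).keys.Nodup := by
    rw [hBkeys, hkeys0]
    exact PySem.Set.nodup_ofList commods
  rw [PySem.Dict.items_eq_map_keys _ hndA "perc", PySem.Dict.items_eq_map_keys _ hndB "perc",
    canon_keys commods (fun i => pvVal buffer i), hBkeys, hkeys0]
  apply List.map_congr_left
  intro k hkset
  have hkc : k ∈ commods := (PySem.Set.mem_ofList commods k).1 hkset
  have hgA : (commods.foldl (fun d i => d.insert i (pvVal buffer i)) PySem.Dict.empty).get? k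
      = some (pvVal buffer k) := by
    rw [foldl_insert_get? commods (fun i => pvVal buffer i) PySem.Dict.empty k]
    simp [hkc]
  have hgB : (buffer.foldl (fun d kv =>
      if (PySem.Set.ofList commods).contains kv.1 then d.insert kv.1 kv.2 else d)
      (commods.foldl (fun d c => d.insert c "perc") PySem.Dict.empty)).get? k
      = some (pvVal buffer k) := by
    rw [hBget k hkc]
    cases hl : pvLastVal buffer k with
    | some v => simp [pvVal, hl]
    | none =>
      rw [hget0 k]
      simp [hkc, pvVal, hl]
  rw [PySem.Dict.getD_of_get?_eq_some _ "perc" hgA, PySem.Dict.getD_of_get?_eq_some _ "perc" hgB]
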